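-- pv_equiv track=rewrite | github.com/MDCGP105-1718/portfolio-s184252 | week_6/task_2.py | find_words_frequency_at_least
-- ===== SOURCE A (Python) =====
-- from collections import defaultdict
--
-- def find_words_frequency_at_least(word_dict, minimum_freq):
-- 	'''
-- 	Finds all words in the input frequency dictionary
-- 	(dict{"word":frequency}) that occur at
-- 	least as frequently as the minimum_freq (int).
-- 	Returns a sorted list of tuples in ascending order of frequency,
-- 	each containing a list of words found grouped by frequency,
-- 	and the number of times the word(s) occur.
-- 	'''
-- 	freq_dict = defaultdict(list)
--
-- 	word_frequency_results = []
--
-- 	for key, value in word_dict.items():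
-- 		if value >= minimum_freq:
-- 			freq_dict[value].append(key)
--
-- 	for key in sorted(freq_dict.keys()):
-- 		word_frequency_results.append((freq_dict[key], key))
--
-- 	return word_frequency_results
-- ===== SOURCE B (Python) =====
-- def find_words_frequency_at_least(word_dict, minimum_freq):
--     # Filter once, stable-sort the (word, freq) pairs by freq, then group
--     # consecutive equal frequencies in a single pass (newest group kept in
--     # front, reversed at the end).
--     pairs = sorted(
--         [(w, f) for w, f in word_dict.items() if f >= minimum_freq],
--         key=lambda p: p[1],
--     )
--     groups = []
--     for w, f in pairs:
--         if groups and groups[0][1] == f: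
--             groups[0][0].append(w)
--         else:
--             groups.insert(0, ([w], f))
--     groups.reverse()
--     return groups
-- ===== Notes on version B (the rewrite author's own statement) =====
-- stated objective: alternative
-- what changed: A buckets words into a defaultdict keyed by frequency and then walks the sorted keys; B filters the items once, stable-sorts the (word, freq) pairs by frequency, and groups consecutive equal frequencies in a single pass.
import Mathlib
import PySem

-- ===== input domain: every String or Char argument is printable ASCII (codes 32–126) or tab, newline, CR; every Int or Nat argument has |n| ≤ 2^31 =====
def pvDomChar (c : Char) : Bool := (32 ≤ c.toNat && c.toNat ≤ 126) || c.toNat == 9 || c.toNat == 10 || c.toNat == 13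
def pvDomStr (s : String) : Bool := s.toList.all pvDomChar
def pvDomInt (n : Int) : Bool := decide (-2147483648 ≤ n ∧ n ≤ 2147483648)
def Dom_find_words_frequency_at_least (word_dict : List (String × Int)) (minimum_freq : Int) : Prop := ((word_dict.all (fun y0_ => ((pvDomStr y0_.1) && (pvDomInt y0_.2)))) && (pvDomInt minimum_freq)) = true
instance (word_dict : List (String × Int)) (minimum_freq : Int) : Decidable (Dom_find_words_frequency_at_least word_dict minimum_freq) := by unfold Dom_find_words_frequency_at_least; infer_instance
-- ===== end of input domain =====

-- B: filter once, stable-sort the (word,freq) pairs by frequency, group consecutive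
-- equal frequencies in one pass — an alternative decomposition of A's bucket-then-sort-keys.
-- ===== PORT A =====
def find_words_frequency_at_least (word_dict : List (String × Int)) (minimum_freq : Int) : List (List String × Int) :=
  let items := (PySem.Dict.ofList word_dict).items
  let freq_dict : PySem.Dict Int (List String) :=
    items.foldl (fun d p => if minimum_freq ≤ p.2 then d.modify p.2 [] (fun ws => ws ++ [p.1]) else d)
      PySem.Dict.empty
  (PySem.List.sorted freq_dict.keys (fun k => k) false).foldl
    (fun res k => res ++ [(freq_dict.getD k [], k)]) []

-- ===== PORT B =====
-- one grouping step of Source B's loop: extend the front group or start a new one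
def pvGroupStep (acc : List (List String × Int)) (p : String × Int) : List (List String × Int) :=
  match acc with
  | (ws, g) :: rest => if g == p.2 then (ws ++ [p.1], g) :: rest else ([p.1], p.2) :: (ws, g) :: rest
  | [] => [([p.1], p.2)]

def find_words_frequency_at_least_alt (word_dict : List (String × Int)) (minimum_freq : Int) : List (List String × Int) :=
  let pairs := PySem.List.sorted
    (((PySem.Dict.ofList word_dict).items).filter (fun p => decide (minimum_freq ≤ p.2)))
    (fun p => p.2) false
  (pairs.foldl pvGroupStep []).reverse

-- ===== PRECONDITION & SPEC =====
def Spec_find_words_frequency_at_least (word_dict : List (String × Int)) (minimum_freq : Int) (out : List (List String × Int)) : Prop := out = find_words_frequency_at_least_alt word_dict minimum_freq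
instance (word_dict : List (String × Int)) (minimum_freq : Int) (out : List (List String × Int)) : Decidable (Spec_find_words_frequency_at_least word_dict minimum_freq out) := by unfold Spec_find_words_frequency_at_least; infer_instance

-- ===== CLAIM (what is proved, stated in full; the proofs are below) =====
def Claim_equal_find_words_frequency_at_least : Prop := ∀ (word_dict : List (String × Int)) (minimum_freq : Int), Dom_find_words_frequency_at_least word_dict minimum_freq → Spec_find_words_frequency_at_least word_dict minimum_freq (find_words_frequency_at_least word_dict minimum_freq)

-- ===== LEMMAS AND PROOFS =====

-- insertBy (by key-<) preserves key-sortedness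
theorem pv_insertBy_pairwise {α κ : Type} [LinearOrder κ] (key : α → κ) (x : α) (ys : List α)
    (h : ys.Pairwise (fun a b => key a ≤ key b)) :
    (PySem.List.insertBy (fun a b => decide (key a < key b)) x ys).Pairwise (fun a b => key a ≤ key b) := by
  induction ys with
  | nil => simp [PySem.List.insertBy]
  | cons y ys ih =>
    rw [List.pairwise_cons] at h
    obtain ⟨hy, hys⟩ := h
    by_cases hlt : key x < key y
    · have he : PySem.List.insertBy (fun a b => decide (key a < key b)) x (y :: ys) = x :: y :: ys := by
        simp [PySem.List.insertBy, hlt]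
      rw [he, List.pairwise_cons]
      refine ⟨?_, List.pairwise_cons.mpr ⟨hy, hys⟩⟩
      intro z hz
      rcases List.mem_cons.mp hz with rfl | hz
      · exact le_of_lt hlt
      · exact le_trans (le_of_lt hlt) (hy _ hz)
    · have he : PySem.List.insertBy (fun a b => decide (key a < key b)) x (y :: ys)
          = y :: PySem.List.insertBy (fun a b => decide (key a < key b)) x ys := by
        simp [PySem.List.insertBy, hlt]
      rw [he, List.pairwise_cons]
      refine ⟨?_, ih hys⟩
      intro z hz
      rw [PySem.List.mem_insertBy] at hz
      rcases hz with rfl | hz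
      · exact le_of_not_gt hlt
      · exact hy _ hz

-- filtering one key class out of an insertBy into a key-sorted list
theorem pv_filter_insertBy {α κ : Type} [LinearOrder κ] [BEq κ] [LawfulBEq κ] (key : α → κ) (k : κ)
    (x : α) (ys : List α) (h : ys.Pairwise (fun a b => key a ≤ key b)) :
    (PySem.List.insertBy (fun a b => decide (key a < key b)) x ys).filter (fun y => key y == k)
      = if key x == k then ys.filter (fun y => key y == k) ++ [x] else ys.filter (fun y => key y == k) := by
  induction ys with
  | nil =>
    by_cases hxk : key x == k <;> simp [PySem.List.insertBy, List.filter, hxk]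
  | cons y ys ih =>
    rw [List.pairwise_cons] at h
    obtain ⟨hy, hys⟩ := h
    by_cases hlt : key x < key y
    · have he : PySem.List.insertBy (fun a b => decide (key a < key b)) x (y :: ys) = x :: y :: ys := by
        simp [PySem.List.insertBy, hlt]
      rw [he]
      by_cases hxk : key x == k
      · have hk : key x = k := eq_of_beq hxk
        have hnil : (y :: ys).filter (fun z => key z == k) = [] := by
          rw [List.filter_eq_nil_iff]
          intro z hz
          have hzy : key y ≤ key z := by
            rcases List.mem_cons.mp hz with rfl | hz
            · exact le_refl _
            · exact hy _ hz
          have : k < key z := lt_of_lt_of_le (hk ▸ hlt) hzy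
          simp [ne_of_gt this]
        simp [hxk, hnil]
      · simp [List.filter_cons, hxk]
    · have he : PySem.List.insertBy (fun a b => decide (key a < key b)) x (y :: ys)
          = y :: PySem.List.insertBy (fun a b => decide (key a < key b)) x ys := by
        simp [PySem.List.insertBy, hlt]
      rw [he, List.filter_cons, ih hys]
      by_cases hyk : key y == k <;> by_cases hxk : key x == k <;>
        simp [hyk, hxk]

-- stability: filtering one key class out of a stable sort gives the original order
theorem pv_filter_sorted_aux {α κ : Type} [LinearOrder κ] [BEq κ] [LawfulBEq κ] (key : α → κ) (k : κ)
    (l : List α) (acc : List α) (hacc : acc.Pairwise (fun a b => key a ≤ key b)) :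
    (l.foldl (fun a x => PySem.List.insertBy (fun a b => decide (key a < key b)) x a) acc).filter
        (fun y => key y == k)
      = acc.filter (fun y => key y == k) ++ l.filter (fun y => key y == k) := by
  induction l generalizing acc with
  | nil => simp
  | cons x l ih =>
    rw [List.foldl_cons, ih _ (pv_insertBy_pairwise key x acc hacc),
      pv_filter_insertBy key k x acc hacc, List.filter_cons]
    by_cases hxk : key x == k <;> simp [hxk]

theorem pv_filter_sorted {α κ : Type} [LinearOrder κ] [BEq κ] [LawfulBEq κ] (key : α → κ) (k : κ)
    (l : List α) :
    (PySem.List.sorted l key false).filter (fun y => key y == k) = l.filter (fun y => key y == k) := by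
  rw [PySem.List.sorted_eq_foldl_insertBy, pv_filter_sorted_aux key k l [] (by simp)]
  simp

-- a key-sorted list is the concatenation of its key classes over any strictly
-- increasing list of keys covering it
theorem pv_sorted_decomp {α κ : Type} [LinearOrder κ] [BEq κ] [LawfulBEq κ] (key : α → κ)
    (sks : List κ) (s : List α) (hs : s.Pairwise (fun a b => key a ≤ key b))
    (hks : sks.Pairwise (· < ·)) (hmem : ∀ x ∈ s, key x ∈ sks) :
    s = sks.flatMap (fun k => s.filter (fun y => key y == k)) := by
  induction sks generalizing s with
  | nil =>
    cases s with
    | nil => simp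
    | cons a s => exact absurd (hmem a (by simp)) (by simp)
  | cons k rest ih =>
    rw [List.pairwise_cons] at hks
    obtain ⟨hkrest, hrest⟩ := hks
    have hsplit := (List.takeWhile_append_dropWhile (p := fun y => key y == k) (l := s)).symm
    have ht_all : ∀ y ∈ s.takeWhile (fun y => key y == k), key y = k := by
      intro y hy
      exact eq_of_beq (List.mem_takeWhile_imp (p := fun y => key y == k) hy)
    have hd_pw : (s.dropWhile (fun y => key y == k)).Pairwise (fun a b => key a ≤ key b) :=
      ((List.pairwise_append.mp (hsplit ▸ hs)).2).1
    have hd_k : ∀ y ∈ s.dropWhile (fun y => key y == k), key y ≠ k ∧ key y ∈ rest := by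
      intro y hy
      have hymem : y ∈ s := (List.dropWhile_sublist _).subset hy
      cases hd : s.dropWhile (fun y => key y == k) with
      | nil => rw [hd] at hy; cases hy
      | cons y0 d' =>
        have hne : s.dropWhile (fun y => key y == k) ≠ [] := by rw [hd]; simp
        have hy0 : (key ((s.dropWhile (fun y => key y == k)).head hne) == k) = false :=
          List.head_dropWhile_not (fun y => key y == k) hne
        have hhead : (s.dropWhile (fun y => key y == k)).head hne = y0 := by
          simp [hd]
        rw [hhead] at hy0
        have hy0k : key y0 ≠ k := by simp at hy0; exact hy0
        have hy0s : y0 ∈ s := (List.dropWhile_sublist _).subset (by rw [hd]; simp)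
        have hy0rest : key y0 ∈ rest := by
          rcases List.mem_cons.mp (hmem y0 hy0s) with h1 | h1
          · exact absurd h1 hy0k
          · exact h1
        have hy0le : key y0 ≤ key y := by
          rw [hd] at hy
          rcases List.mem_cons.mp hy with rfl | hy'
          · exact le_refl _
          · rw [hd] at hd_pw
            exact (List.pairwise_cons.mp hd_pw).1 _ hy'
        have hky : k < key y := lt_of_lt_of_le (hkrest _ hy0rest) hy0le
        refine ⟨ne_of_gt hky, ?_⟩
        rcases List.mem_cons.mp (hmem y hymem) with h1 | h1
        · exact absurd h1 (ne_of_gt hky)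
        · exact h1
    have f1 : s.filter (fun y => key y == k) = s.takeWhile (fun y => key y == k) := by
      conv_lhs => rw [hsplit]
      rw [List.filter_append, List.filter_eq_self.mpr (fun y hy => List.mem_takeWhile_imp (p := fun y => key y == k) hy),
        List.filter_eq_nil_iff.mpr (fun y hy => by simp [(hd_k y hy).1]), List.append_nil]
    have f2 : ∀ k' ∈ rest, s.filter (fun y => key y == k')
        = (s.dropWhile (fun y => key y == k)).filter (fun y => key y == k') := by
      intro k' hk'
      conv_lhs => rw [hsplit]
      rw [List.filter_append, List.filter_eq_nil_iff.mpr ?_, List.nil_append]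
      intro y hy
      have : key y = k := ht_all y hy
      simp [this, ne_of_lt (hkrest _ hk')]
    have ihd := ih (s.dropWhile (fun y => key y == k)) hd_pw hrest (fun y hy => (hd_k y hy).2)
    rw [List.flatMap_cons, f1]
    have : rest.flatMap (fun k' => s.filter (fun y => key y == k'))
        = rest.flatMap (fun k' => (s.dropWhile (fun y => key y == k)).filter (fun y => key y == k')) := by
      apply List.flatMap_congr
      intro k' hk'
      exact f2 k' hk'
    rw [this, ← ihd]
    exact hsplit

-- running Source B's grouping loop over one block of equal frequency k
theorem pv_foldl_run (qs : List (String × Int)) (k : Int) (ws : List String)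
    (rest : List (List String × Int)) (hk : ∀ q ∈ qs, q.2 = k) :
    qs.foldl pvGroupStep ((ws, k) :: rest) = ((ws ++ qs.map (fun q => q.1), k) :: rest) := by
  induction qs generalizing ws with
  | nil => simp
  | cons q qs ih =>
    have hq : q.2 = k := hk q (by simp)
    rw [List.foldl_cons]
    have hstep : pvGroupStep ((ws, k) :: rest) q = ((ws ++ [q.1], k) :: rest) := by
      simp [pvGroupStep, hq]
    rw [hstep, ih (ws ++ [q.1]) (fun q hq => hk q (by simp [hq]))]
    simp

-- running Source B's grouping loop over a flatMap of nonempty equal-frequency blocks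
theorem pv_foldl_group (sks : List Int) (g : Int → List (String × Int))
    (hks : sks.Pairwise (· < ·))
    (hk : ∀ k ∈ sks, ∀ q ∈ g k, q.2 = k) (hne : ∀ k ∈ sks, g k ≠ [])
    (acc : List (List String × Int)) (hacc : ∀ k ∈ sks, ∀ ws f, acc.head? = some (ws, f) → f ≠ k) :
    (sks.flatMap g).foldl pvGroupStep acc
      = (sks.map (fun k => ((g k).map (fun q => q.1), k))).reverse ++ acc := by
  induction sks generalizing acc with
  | nil => simp
  | cons k rest ih =>
    rw [List.pairwise_cons] at hks
    obtain ⟨hkrest, hrest⟩ := hks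
    obtain ⟨q, qs, hgk⟩ : ∃ q qs, g k = q :: qs := by
      cases h : g k with
      | nil => exact absurd h (hne k (by simp))
      | cons q qs => exact ⟨q, qs, rfl⟩
    have hq2 : q.2 = k := hk k (by simp) q (by rw [hgk]; simp)
    have hstep : pvGroupStep acc q = ([q.1], k) :: acc := by
      cases acc with
      | nil => simp [pvGroupStep, hq2]
      | cons a acc' =>
        obtain ⟨ws0, f0⟩ := a
        have hf0 : f0 ≠ k := hacc k (by simp) ws0 f0 (by simp)
        simp [pvGroupStep, hq2, hf0]
    have hrun : (g k).foldl pvGroupStep acc = (((g k).map (fun q => q.1), k) :: acc) := by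
      rw [hgk, List.foldl_cons, hstep,
        pv_foldl_run qs k [q.1] acc (fun p hp => hk k (by simp) p (by rw [hgk]; simp [hp]))]
      simp
    rw [List.flatMap_cons, List.foldl_append, hrun,
      ih hrest (fun k' hk' => hk k' (by simp [hk'])) (fun k' hk' => hne k' (by simp [hk']))
        ((((g k).map (fun q => q.1), k)) :: acc)
        (fun k' hk' ws f hf => by
          simp at hf
          rw [← hf.2]
          exact ne_of_lt (hkrest _ hk'))]
    simp

-- A's result in closed form
theorem pv_A_eq (word_dict : List (String × Int)) (minimum_freq : Int) :
    find_words_frequency_at_least word_dict minimum_freq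
      = (PySem.List.sorted
          (PySem.Set.ofList ((((PySem.Dict.ofList word_dict).items).filter
            (fun p => decide (minimum_freq ≤ p.2))).map (fun p => p.2))) (fun k => k) false).map
          (fun k => (((((PySem.Dict.ofList word_dict).items).filter
            (fun p => decide (minimum_freq ≤ p.2))).filter (fun p => p.2 == k)).map (fun p => p.1), k)) := by
  simp only [find_words_frequency_at_least]
  rw [PySem.List.foldl_ite_eq_foldl_filter (fun p : String × Int => minimum_freq ≤ p.2)
    (fun (d : PySem.Dict Int (List String)) (p : String × Int) => d.modify p.2 [] (fun ws => ws ++ [p.1]))]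
  rw [PySem.List.foldl_append_singleton_eq_map, List.nil_append]
  have hl : ∀ (l : List (String × Int)),
      l.foldl (fun d p => d.modify p.2 [] (fun ws => ws ++ [p.1])) PySem.Dict.empty
        = (l.map Prod.swap).foldl (fun d q => d.modify q.1 [] (fun ws => ws ++ [q.2])) PySem.Dict.empty := by
    intro l; rw [List.foldl_map]; rfl
  have hkeys : ∀ (l : List (String × Int)),
      (l.foldl (fun d p => d.modify p.2 [] (fun ws => ws ++ [p.1])) PySem.Dict.empty).keys
        = PySem.Set.ofList (l.map (fun p => p.2)) := by
    intro l
    rw [PySem.Dict.keys_foldl_modify_key l (fun p => p.2) []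
      (fun _ p => fun ws => ws ++ [p.1]) PySem.Dict.empty]
    simp [PySem.Dict.keys_empty, PySem.Set.update, PySem.Set.ofList_eq_foldl]
  have hgetD : ∀ (l : List (String × Int)) (k : Int),
      (l.foldl (fun d p => d.modify p.2 [] (fun ws => ws ++ [p.1])) PySem.Dict.empty).getD k []
        = (l.filter (fun p => p.2 == k)).map (fun p => p.1) := by
    intro l k
    rw [hl, PySem.Dict.getD_foldl_modify_append, PySem.Dict.getD_empty, List.nil_append,
      List.filter_map, List.map_map]
    simp [Function.comp_def, Prod.swap]
  rw [hkeys]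
  exact List.map_congr_left (fun k _ => by rw [hgetD])

-- B's result in the same closed form
theorem pv_B_eq (word_dict : List (String × Int)) (minimum_freq : Int) :
    find_words_frequency_at_least_alt word_dict minimum_freq
      = (PySem.List.sorted
          (PySem.Set.ofList ((((PySem.Dict.ofList word_dict).items).filter
            (fun p => decide (minimum_freq ≤ p.2))).map (fun p => p.2))) (fun k => k) false).map
          (fun k => (((((PySem.Dict.ofList word_dict).items).filter
            (fun p => decide (minimum_freq ≤ p.2))).filter (fun p => p.2 == k)).map (fun p => p.1), k)) := by
  simp only [find_words_frequency_at_least_alt]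
  set l := ((PySem.Dict.ofList word_dict).items).filter (fun p => decide (minimum_freq ≤ p.2)) with hl
  set sks := PySem.List.sorted (PySem.Set.ofList (l.map (fun p => p.2))) (fun k => k) false with hsks
  have hks : sks.Pairwise (· < ·) := PySem.List.sorted_ofList_pairwise_lt (l.map (fun p => p.2))
  have hmem : ∀ x ∈ PySem.List.sorted l (fun p => p.2) false, x.2 ∈ sks := by
    intro x hx
    rw [PySem.List.mem_sorted] at hx
    rw [hsks, PySem.List.mem_sorted, PySem.Set.mem_ofList]
    exact List.mem_map_of_mem hx
  have hdecomp := pv_sorted_decomp (fun p : String × Int => p.2) sks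
    (PySem.List.sorted l (fun p => p.2) false) (PySem.List.sorted_pairwise l (fun p => p.2)) hks hmem
  conv_lhs => rw [hdecomp]
  have hfilters : ∀ k, (PySem.List.sorted l (fun p => p.2) false).filter (fun p => p.2 == k)
      = l.filter (fun p => p.2 == k) := fun k => pv_filter_sorted (fun p : String × Int => p.2) k l
  have hflat : sks.flatMap (fun k => (PySem.List.sorted l (fun p => p.2) false).filter (fun p => p.2 == k))
      = sks.flatMap (fun k => l.filter (fun p => p.2 == k)) :=
    List.flatMap_congr (fun k _ => hfilters k)
  rw [hflat, pv_foldl_group sks (fun k => l.filter (fun p => p.2 == k)) hks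
    (fun k _ q hq => eq_of_beq (List.mem_filter.mp hq).2)
    (fun k hk => by
      rw [hsks, PySem.List.mem_sorted, PySem.Set.mem_ofList, List.mem_map] at hk
      obtain ⟨p, hp, hpk⟩ := hk
      intro hnil
      have hnil' : l.filter (fun p => p.2 == k) = [] := hnil
      have : p ∈ l.filter (fun p => p.2 == k) := List.mem_filter.mpr ⟨hp, by simp [hpk]⟩
      rw [hnil'] at this
      cases this)
    [] (fun _ _ _ _ h => by cases h)]
  simp

-- ===== VERDICT (by name: the statement is the Claim_ definition above) =====
theorem find_words_frequency_at_least_spec : Claim_equal_find_words_frequency_at_least := by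
  intro word_dict minimum_freq _
  unfold Spec_find_words_frequency_at_least
  rw [pv_A_eq, pv_B_eq]
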